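-- pv_equiv track=rewrite | github.com/HakierGrzonzo/hackyeah | opener/xsd_parser/__init__.py | canonizeUrl
-- ===== SOURCE A (Python) =====
-- def canonizeUrl(url):
--     new_url = []
--     old_url = url.split("/")
--     for i in range(0, len(old_url) - 1):
--         if old_url[i + 1] != ".." and old_url[i] != "..":
--             new_url.append(old_url[i])
--     new_url.append(old_url[-1])
--     return "/".join(new_url)
-- ===== SOURCE B (Python) =====
-- def canonizeUrl(url):
--     segs = url.split("/")
--     last = len(segs) - 1
--     delete = set()
--     for j, seg in enumerate(segs):
--         if seg == "..":
--             if j != last: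
--                 delete.add(j)
--             if j > 0:
--                 delete.add(j - 1)
--     return "/".join(seg for j, seg in enumerate(segs) if j not in delete)
-- ===== Notes on version B (the rewrite author's own statement) =====
-- stated objective: alternative
-- what changed: A keeps segments in one index loop testing neighbours; B is a two-pass decomposition: first build a set of indices to delete (each '..' deletes itself unless last, and its predecessor), then filter-and-join the segments by index.
import Mathlib
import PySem

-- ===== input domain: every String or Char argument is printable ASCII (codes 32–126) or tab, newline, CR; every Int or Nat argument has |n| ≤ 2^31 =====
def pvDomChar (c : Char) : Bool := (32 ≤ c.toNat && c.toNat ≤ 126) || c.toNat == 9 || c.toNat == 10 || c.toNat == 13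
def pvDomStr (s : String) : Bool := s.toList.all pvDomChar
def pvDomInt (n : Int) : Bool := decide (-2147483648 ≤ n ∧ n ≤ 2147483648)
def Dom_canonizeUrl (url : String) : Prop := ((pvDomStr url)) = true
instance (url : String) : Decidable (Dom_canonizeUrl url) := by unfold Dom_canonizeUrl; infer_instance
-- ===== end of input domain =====

-- B replaces A's single index loop by a two-pass decomposition (build a delete-set of indices,
-- then filter-and-join); same cost, objective: alternative decomposition. Both are total.

-- ===== PORT A =====
-- old_url[i], old_url[i+1], old_url[-1] are always in range (split yields a nonempty list and
-- 0 ≤ i < len - 1), so pyGet? is always `some` and `.getD ""` is exact there.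
def canonizeUrl (url : String) : String :=
  let oldUrl := (PySem.Str.split? url "/").getD []   -- sep "/" ≠ "", so split? is `some`
  let newUrl := (PySem.List.pyRange 0 ((oldUrl.length : Int) - 1)).foldl
    (fun acc i =>
      if (PySem.List.pyGet? oldUrl (i + 1)).getD "" ≠ ".." ∧
         (PySem.List.pyGet? oldUrl i).getD "" ≠ ".." then
        acc ++ [(PySem.List.pyGet? oldUrl i).getD ""]
      else acc) []
  PySem.Str.join "/" (newUrl ++ [(PySem.List.pyGet? oldUrl (-1)).getD ""])

-- ===== PORT B =====
def canonizeUrl_alt (url : String) : String :=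
  let segs := (PySem.Str.split? url "/").getD []     -- sep "/" ≠ "", so split? is `some`
  let last : Int := (segs.length : Int) - 1
  let del : PySem.Set Int := (PySem.List.enumerate segs).foldl
    (fun d js =>
      if js.2 = ".." then
        let d1 := if js.1 ≠ last then PySem.Set.add d js.1 else d
        if 0 < js.1 then PySem.Set.add d1 (js.1 - 1) else d1
      else d) PySem.Set.empty
  PySem.Str.join "/" ((PySem.List.enumerate segs).filterMap
    (fun js => if js.1 ∈ del then none else some js.2))

-- ===== PRECONDITION & SPEC =====
def Spec_canonizeUrl (url : String) (out : String) : Prop := out = canonizeUrl_alt url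
instance (url : String) (out : String) : Decidable (Spec_canonizeUrl url out) := by unfold Spec_canonizeUrl; infer_instance

-- ===== CLAIM (what is proved, stated in full; the proofs are below) =====
def Claim_equal_canonizeUrl : Prop := ∀ (url : String), Dom_canonizeUrl url → Spec_canonizeUrl url (canonizeUrl url)

-- ===== LEMMAS AND PROOFS =====

-- splitOn.go never returns the empty list (its result is always `(… :: acc).reverse`).
theorem pv_splitOn_go_ne_nil (sep : List Char) (fuel : Nat) (l cur : List Char)
    (acc : List (List Char)) : PySem.Chars.splitOn.go sep fuel l cur acc ≠ [] := by
  induction fuel generalizing l cur acc with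
  | zero => simp [PySem.Chars.splitOn.go]
  | succ fuel ih =>
    cases l with
    | nil => simp [PySem.Chars.splitOn.go]
    | cons c rest =>
      rw [PySem.Chars.splitOn.go]
      split
      · exact ih _ _ _
      · exact ih _ _ _

theorem pv_segs_ne_nil (url : String) : (PySem.Str.split? url "/").getD [] ≠ [] := by
  have h : (PySem.Str.split? url "/").getD [] =
      (PySem.Chars.splitOn url.toList ['/']).map String.ofList := by
    simp [PySem.Str.split?, PySem.Chars.split?]
  rw [h]
  simpa using pv_splitOn_go_ne_nil ['/'] _ url.toList [] []

-- membership in B's delete-set fold: one step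
theorem pv_mem_del_step (last : Int) (p : Int × String) (d : PySem.Set Int) (x : Int) :
    (x ∈ (if p.2 = ".." then
        let d1 := if p.1 ≠ last then PySem.Set.add d p.1 else d
        if 0 < p.1 then PySem.Set.add d1 (p.1 - 1) else d1
      else d))
    ↔ x ∈ d ∨ (p.2 = ".." ∧ ((x = p.1 ∧ p.1 ≠ last) ∨ (x = p.1 - 1 ∧ 0 < p.1))) := by
  by_cases h1 : p.2 = ".." <;> by_cases h3 : p.1 ≠ last <;> by_cases h2 : 0 < p.1 <;>
    (first
      | (simp [h1, h3, h2, PySem.Set.mem_add]; tauto)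
      | simp [h1, h3, h2, PySem.Set.mem_add])

-- membership in B's delete-set fold
theorem pv_mem_del_fold (last : Int) (ps : List (Int × String)) (d : PySem.Set Int) (x : Int) :
    (x ∈ ps.foldl
      (fun d js =>
        if js.2 = ".." then
          let d1 := if js.1 ≠ last then PySem.Set.add d js.1 else d
          if 0 < js.1 then PySem.Set.add d1 (js.1 - 1) else d1
        else d) d)
    ↔ x ∈ d ∨ ∃ js ∈ ps, js.2 = ".." ∧
        ((x = js.1 ∧ js.1 ≠ last) ∨ (x = js.1 - 1 ∧ 0 < js.1)) := by
  induction ps generalizing d with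
  | nil => simp
  | cons p t ih =>
    rw [List.foldl_cons, ih, pv_mem_del_step]
    simp only [List.exists_mem_cons_iff]
    exact or_assoc

-- `filterMap` of an if-none-else-some is a filter-then-map
theorem pv_filterMap_ite_none {α β : Type} (p : α → Prop) [DecidablePred p] (g : α → β)
    (l : List α) :
    l.filterMap (fun x => if p x then none else some (g x)) =
      (l.filter (fun x => !decide (p x))).map g := by
  induction l with
  | nil => rfl
  | cons a t ih => by_cases h : p a <;> simp [h, ih]

-- characterisation of B's delete-set on the real indices
theorem pv_mem_del (segs : List String) (m : Nat) (hn : segs.length = m + 1) (k : Nat) :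
    ((k : Int) ∈ (PySem.List.enumerate segs).foldl
      (fun d js =>
        if js.2 = ".." then
          let d1 := if js.1 ≠ ((segs.length : Int) - 1) then PySem.Set.add d js.1 else d
          if 0 < js.1 then PySem.Set.add d1 (js.1 - 1) else d1
        else d) PySem.Set.empty)
    ↔ (k < m ∧ (segs.getD k "" = ".." ∨ segs.getD (k + 1) "" = "..")) := by
  rw [pv_mem_del_fold]
  rw [PySem.List.enumerate_eq_map_pyRange segs ""]
  have hlen : PySem.List.len segs = ((m + 1 : Nat) : Int) := by
    simp [PySem.List.len, hn]
  rw [hlen, PySem.List.pyRange_zero_natCast, List.map_map]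
  simp only [Function.comp_def, List.mem_map, List.mem_range, PySem.Set.empty,
    List.not_mem_nil, false_or, PySem.List.pyGetD_natCast]
  constructor
  · rintro ⟨js, ⟨j, hj, rfl⟩, hdots, hcase⟩
    dsimp only at hdots hcase
    rcases hcase with ⟨h1, h2⟩ | ⟨h1, h2⟩
    · have hkj : k = j := by exact_mod_cast h1
      subst hkj
      exact ⟨by omega, Or.inl hdots⟩
    · have hj1 : 1 ≤ j := by exact_mod_cast h2
      have hkj : k = j - 1 := by omega
      subst hkj
      refine ⟨by omega, Or.inr ?_⟩
      rw [show j - 1 + 1 = j by omega]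
      exact hdots
  · rintro ⟨hkm, hdots | hdots⟩
    · exact ⟨((k : Int), segs.getD k ""), ⟨k, by omega, rfl⟩, hdots,
        Or.inl ⟨rfl, by simp only []; omega⟩⟩
    · exact ⟨(((k + 1 : Nat) : Int), segs.getD (k + 1) ""), ⟨k + 1, by omega, rfl⟩, hdots,
        Or.inr ⟨by push_cast; ring, by push_cast; omega⟩⟩

-- the two built segment lists agree
theorem pv_lists_eq (segs : List String) (h : segs ≠ []) :
    ((PySem.List.pyRange 0 ((segs.length : Int) - 1)).foldl
      (fun acc i =>
        if (PySem.List.pyGet? segs (i + 1)).getD "" ≠ ".." ∧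
           (PySem.List.pyGet? segs i).getD "" ≠ ".." then
          acc ++ [(PySem.List.pyGet? segs i).getD ""]
        else acc) []) ++ [(PySem.List.pyGet? segs (-1)).getD ""]
    = (PySem.List.enumerate segs).filterMap
        (fun js => if js.1 ∈ ((PySem.List.enumerate segs).foldl
          (fun d js =>
            if js.2 = ".." then
              let d1 := if js.1 ≠ ((segs.length : Int) - 1) then PySem.Set.add d js.1 else d
              if 0 < js.1 then PySem.Set.add d1 (js.1 - 1) else d1
            else d) PySem.Set.empty) then none else some js.2) := by
  obtain ⟨m, hn⟩ : ∃ m, segs.length = m + 1 :=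
    ⟨segs.length - 1, by cases segs <;> simp_all⟩
  set D := (PySem.List.enumerate segs).foldl
    (fun d js =>
      if js.2 = ".." then
        let d1 := if js.1 ≠ ((segs.length : Int) - 1) then PySem.Set.add d js.1 else d
        if 0 < js.1 then PySem.Set.add d1 (js.1 - 1) else d1
      else d) PySem.Set.empty with hD
  have hmem : ∀ k : Nat, ((k : Int) ∈ D) ↔
      (k < m ∧ (segs.getD k "" = ".." ∨ segs.getD (k + 1) "" = "..")) := by
    intro k; rw [hD]; exact pv_mem_del segs m hn k
  -- A side: the loop is a filter-then-map over range m
  rw [PySem.List.foldl_append_ite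
    (p := fun i => (PySem.List.pyGet? segs (i + 1)).getD "" ≠ ".." ∧
      (PySem.List.pyGet? segs i).getD "" ≠ "..")
    (f := fun i => (PySem.List.pyGet? segs i).getD "")]
  have hm : ((segs.length : Int) - 1) = ((m : Nat) : Int) := by omega
  rw [hm, PySem.List.pyRange_zero_natCast, List.filter_map, List.map_map]
  -- B side: enumerate is a map over range (m+1); split off the last index
  conv_rhs => rw [PySem.List.enumerate_eq_map_pyRange segs ""]
  have hlen : PySem.List.len segs = ((m + 1 : Nat) : Int) := by
    simp [PySem.List.len, hn]
  rw [hlen, PySem.List.pyRange_zero_natCast, List.map_map, List.filterMap_map]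
  dsimp only [Function.comp_def]
  rw [List.range_succ, List.filterMap_append]
  rw [pv_filterMap_ite_none (p := fun k : Nat => ((k : Int) ∈ D))
    (g := fun k : Nat => PySem.List.pyGetD segs ((k : Int)) "")]
  simp only [List.nil_append, List.filterMap_cons, List.filterMap_nil]
  rw [if_neg (by rw [hmem m]; omega)]
  congr 1
  · -- the first m entries agree
    congr 1
    apply List.filter_congr
    intro k hk
    rw [List.mem_range] at hk
    have h1 : (PySem.List.pyGet? segs ((k : Int) + 1)).getD "" = segs.getD (k + 1) "" := by
      rw [show ((k : Int) + 1) = ((k + 1 : Nat) : Int) by push_cast; ring,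
        PySem.List.pyGet?_natCast]
      simp [List.getD]
    have h2 : (PySem.List.pyGet? segs ((k : Int))).getD "" = segs.getD k "" := by
      rw [PySem.List.pyGet?_natCast]; simp [List.getD]
    simp only [h1, h2, hmem k]
    simp [hk, Bool.and_comm]
  · -- the last segment: segs[-1] = segs[m]
    have hget : PySem.List.pyGet? segs (-1) = some (segs.getD m "") := by
      simp only [PySem.List.pyGet?, PySem.List.pyIdx?]
      norm_num [hn]
    rw [hget, PySem.List.pyGetD, PySem.List.pyGet?_natCast]
    simp [List.getD]

-- ===== VERDICT (by name: the statement is the Claim_ definition above) =====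
theorem canonizeUrl_spec : Claim_equal_canonizeUrl := by
  intro url _
  unfold Spec_canonizeUrl canonizeUrl canonizeUrl_alt
  simp only []
  rw [pv_lists_eq _ (pv_segs_ne_nil url)]
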